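-- pv_equiv track=rewrite | github.com/AMDEPYC/sev_component_test | sev_component_test/snp_component_tests.py | get_rmp_address
-- ===== SOURCE A (Python) =====
-- def get_rmp_address(dmesg_string):
--     '''
--     Function to find the reserved rmp table addresses from the string presented in the kernel message.
--     '''
--     # CCP
--     ccp = ''
--     # RMP table notice
--     rmp_message = ''
--     # Addresses found
--     rmp_address = ''
--
--     out_of_ccp = False
--     in_rmp_address = False
--
--     for char in dmesg_string:
--         if not char.isalpha() and not out_of_ccp:
--             ccp += char
--         # Out of the ccp, collect RMP string
--         elif char.isalpha() and not out_of_ccp: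
--             out_of_ccp = True
--             rmp_message += char
--         # Continue to collect RMP messge
--         elif out_of_ccp and not in_rmp_address and char != "[" and not char.isnumeric():
--             rmp_message += char
--         # Collected the message, now collet the adress if there is any.
--         elif out_of_ccp and (char == "[" or char.isnumeric()) and not in_rmp_address:
--             in_rmp_address = True
--             rmp_address += char
--         elif in_rmp_address:
--             rmp_address += char
--
--     # Formatted string returned
--     return rmp_message, rmp_address
-- ===== SOURCE B (Python) =====
-- def get_rmp_address(dmesg_string):
--     '''
--     Function to find the reserved rmp table addresses from the string presented in the kernel message.
--     '''
--     start = next((i for i, c in enumerate(dmesg_string) if c.isalpha()), None)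
--     if start is None:
--         return '', ''
--     rest = dmesg_string[start:]
--     p = next((i for i, c in enumerate(rest) if c == '[' or c.isnumeric()), None)
--     if p is None:
--         return rest, ''
--     return rest[:p], rest[p:]
-- ===== Notes on version B (the rewrite author's own statement) =====
-- stated objective: simpler
-- what changed: Replaced the five-way stateful char-by-char accumulation (two boolean flags, three growing strings) by two boundary searches (first alphabetic char, then first '['/numeric char) and slicing.
import Mathlib
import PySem

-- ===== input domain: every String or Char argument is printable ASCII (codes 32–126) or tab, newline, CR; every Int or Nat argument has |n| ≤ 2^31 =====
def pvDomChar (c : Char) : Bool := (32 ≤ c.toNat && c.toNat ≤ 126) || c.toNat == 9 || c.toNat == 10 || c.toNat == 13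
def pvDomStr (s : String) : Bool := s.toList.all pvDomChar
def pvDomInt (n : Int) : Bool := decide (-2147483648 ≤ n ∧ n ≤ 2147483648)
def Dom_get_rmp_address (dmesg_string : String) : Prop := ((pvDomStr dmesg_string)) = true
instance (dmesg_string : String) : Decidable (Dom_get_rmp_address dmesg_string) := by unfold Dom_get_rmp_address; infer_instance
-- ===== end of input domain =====

-- B replaces A's five-way stateful char loop by two boundary searches plus slicing (objective: simpler).

-- ===== PORT A =====
-- One loop step of A: state = (ccp, rmp_message, rmp_address, out_of_ccp, in_rmp_address).
-- On the ASCII domain, Python's isnumeric coincides with isdigit (ported as PySem.Chars.isdigit).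
def pvStepA (st : List Char × List Char × List Char × Bool × Bool) (c : Char) :
    List Char × List Char × List Char × Bool × Bool :=
  let (ccp, msg, addr, out, inr) := st
  if !(PySem.Chars.isalpha c) && !out then (ccp ++ [c], msg, addr, out, inr)
  else if PySem.Chars.isalpha c && !out then (ccp, msg ++ [c], addr, true, inr)
  else if out && !inr && (c != '[') && !(PySem.Chars.isdigit c) then (ccp, msg ++ [c], addr, out, inr)
  else if out && ((c == '[') || PySem.Chars.isdigit c) && !inr then (ccp, msg, addr ++ [c], out, true)
  else if inr then (ccp, msg, addr ++ [c], out, inr)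
  else (ccp, msg, addr, out, inr)

def get_rmp_address (dmesg_string : String) : String × String :=
  let fin := dmesg_string.toList.foldl pvStepA ([], [], [], false, false)
  (String.ofList fin.2.1, String.ofList fin.2.2.1)

-- ===== PORT B =====
-- Source B's terminator test: c == '[' or c.isnumeric().
def pvTermB (c : Char) : Bool := (c == '[') || PySem.Chars.isdigit c

def get_rmp_address_alt (dmesg_string : String) : String × String :=
  let cs := dmesg_string.toList
  match cs.findIdx? PySem.Chars.isalpha with
  | none => ("", "")
  | some start =>
    let rest := cs.drop start
    match rest.findIdx? pvTermB with
    | none => (String.ofList rest, "")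
    | some p => (String.ofList (rest.take p), String.ofList (rest.drop p))

-- ===== PRECONDITION & SPEC =====
def Spec_get_rmp_address (dmesg_string : String) (out : String × String) : Prop := out = get_rmp_address_alt dmesg_string
instance (dmesg_string : String) (out : String × String) : Decidable (Spec_get_rmp_address dmesg_string out) := by unfold Spec_get_rmp_address; infer_instance

-- ===== CLAIM (what is proved, stated in full; the proofs are below) =====
def Claim_equal_get_rmp_address : Prop := ∀ (dmesg_string : String), Dom_get_rmp_address dmesg_string → Spec_get_rmp_address dmesg_string (get_rmp_address dmesg_string)

-- ===== LEMMAS AND PROOFS =====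

-- An alphabetic char is neither '[' nor a digit (ranges 65–90 / 97–122 vs 91 / 48–57).
theorem pv_alpha_not_term (c : Char) (h : PySem.Chars.isalpha c = true) : pvTermB c = false := by
  simp only [PySem.Chars.isalpha, PySem.Chars.isupper, PySem.Chars.islower, Bool.or_eq_true,
    decide_eq_true_eq, Bool.and_eq_true, Char.le_def, UInt32.le_iff_toNat_le] at h
  simp only [pvTermB, Bool.or_eq_false_iff, PySem.Chars.isdigit, beq_eq_false_iff_ne, ne_eq,
    Char.ext_iff, Bool.and_eq_false_iff, decide_eq_false_iff_not,
    Char.le_def, UInt32.le_iff_toNat_le, UInt32.ext_iff]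
  rcases h with ⟨h1,h2⟩|⟨h1,h2⟩ <;> norm_num at h1 h2 ⊢ <;>
    simp only [show 'A'.toNat = 65 from rfl, show 'Z'.toNat = 90 from rfl,
      show 'a'.toNat = 97 from rfl, show 'z'.toNat = 122 from rfl, show '['.toNat = 91 from rfl,
      show '0'.toNat = 48 from rfl, show '9'.toNat = 57 from rfl] at * <;> omega

-- Phase 3: once in_rmp_address is set, every remaining char is appended to the address.
theorem pv_phase3 (cs : List Char) (ccp msg addr : List Char) :
    cs.foldl pvStepA (ccp, msg, addr, true, true) = (ccp, msg, addr ++ cs, true, true) := by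
  induction cs generalizing addr with
  | nil => simp
  | cons c tl ih => simp [pvStepA, ih]

-- Phase 2: out_of_ccp set, address not started — message grows until the first '['/digit char.
theorem pv_phase2 (cs : List Char) (ccp msg : List Char) :
    cs.foldl pvStepA (ccp, msg, [], true, false) =
      match cs.findIdx? pvTermB with
      | none => (ccp, msg ++ cs, [], true, false)
      | some p => (ccp, msg ++ cs.take p, cs.drop p, true, true) := by
  induction cs generalizing msg with
  | nil => simp
  | cons c tl ih =>
    by_cases hc : pvTermB c = true
    · have ht : pvStepA (ccp, msg, [], true, false) c = (ccp, msg, [c], true, true) := by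
        simp only [pvTermB, Bool.or_eq_true] at hc
        simp [pvStepA]
        rcases hc with hc | hc <;> simp_all
      simp only [List.foldl_cons, ht, pv_phase3, List.findIdx?_cons, hc, if_pos]
      simp
    · have hf : pvTermB c = false := by simpa using hc
      have ht : pvStepA (ccp, msg, [], true, false) c = (ccp, msg ++ [c], [], true, false) := by
        simp only [pvTermB, Bool.or_eq_false_iff] at hf
        simp [pvStepA, hf.2, beq_eq_false_iff_ne.mp hf.1]
      simp only [List.foldl_cons, ht, ih, List.findIdx?_cons, hf]
      cases h : tl.findIdx? pvTermB <;> simp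

-- Phase 1: before any alphabetic char, only ccp grows; the first alphabetic char starts phase 2.
theorem pv_phase1 (cs : List Char) (ccp : List Char) :
    (fun st => (st.2.1, st.2.2.1)) (cs.foldl pvStepA (ccp, [], [], false, false)) =
      (match cs.findIdx? PySem.Chars.isalpha with
      | none => (([] : List Char), ([] : List Char))
      | some start =>
        let rest := cs.drop start
        match rest.findIdx? pvTermB with
        | none => (rest, [])
        | some p => (rest.take p, rest.drop p)) := by
  induction cs generalizing ccp with
  | nil => simp
  | cons c tl ih =>
    by_cases ha : PySem.Chars.isalpha c = true
    · have ht : pvStepA (ccp, [], [], false, false) c = (ccp, [c], [], true, false) := by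
        simp [pvStepA, ha]
      have hterm := pv_alpha_not_term c ha
      simp only [List.foldl_cons, ht, pv_phase2, List.findIdx?_cons, ha, if_pos,
        List.drop_zero, hterm, if_neg, Bool.false_eq_true, not_false_iff]
      cases h : tl.findIdx? pvTermB <;> simp
    · have hf : PySem.Chars.isalpha c = false := by simpa using ha
      have ht : pvStepA (ccp, [], [], false, false) c = (ccp ++ [c], [], [], false, false) := by
        simp [pvStepA, hf]
      simp only [List.foldl_cons, ht, ih, List.findIdx?_cons, hf]
      cases h : tl.findIdx? PySem.Chars.isalpha <;> simp

-- ===== VERDICT (by name: the statement is the Claim_ definition above) =====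
theorem get_rmp_address_spec : Claim_equal_get_rmp_address := by
  intro s _
  unfold Spec_get_rmp_address get_rmp_address get_rmp_address_alt
  have h := pv_phase1 s.toList []
  cases hf : s.toList.findIdx? PySem.Chars.isalpha with
  | none =>
    simp only [hf] at h
    rw [Prod.mk.injEq] at h
    simp [hf, h.1, h.2]
  | some start =>
    simp only [hf] at h
    cases hg : (s.toList.drop start).findIdx? pvTermB with
    | none =>
      simp only [hg] at h
      rw [Prod.mk.injEq] at h
      simp [hf, hg, h.1, h.2]
    | some p =>
      simp only [hg] at h
      rw [Prod.mk.injEq] at h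
      simp [hf, hg, h.1, h.2]
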